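-- pv_equiv track=rewrite | github.com/bokkuembab/BOJAutoPush | 프로그래머스/lv3/12938. 최고의 집합/최고의 집합.py | solution
-- ===== SOURCE A (Python) =====
-- def solution(n, s):
--     ans = []
--
--     if s // n == 0:
--         return [-1]
--
--     if s % n == 0:
--         return [s // n] * n
--     else:
--         while n >= 1:
--             ans.append(s // n)
--             s -= s // n
--             n -= 1
--
--     return ans
-- ===== SOURCE B (Python) =====
-- def solution(n, s):
--     q, r = divmod(s, n)
--     if q == 0:
--         return [-1]
--     return [q] * (n - r) + [q + 1] * r
-- ===== Notes on version B (the rewrite author's own statement) =====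
-- stated objective: simpler
-- what changed: Replaces the greedy while-loop (repeatedly append s//n, subtract, decrement n) with a single divmod and the closed-form list [q]*(n-r)+[q+1]*r.
import Mathlib
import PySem

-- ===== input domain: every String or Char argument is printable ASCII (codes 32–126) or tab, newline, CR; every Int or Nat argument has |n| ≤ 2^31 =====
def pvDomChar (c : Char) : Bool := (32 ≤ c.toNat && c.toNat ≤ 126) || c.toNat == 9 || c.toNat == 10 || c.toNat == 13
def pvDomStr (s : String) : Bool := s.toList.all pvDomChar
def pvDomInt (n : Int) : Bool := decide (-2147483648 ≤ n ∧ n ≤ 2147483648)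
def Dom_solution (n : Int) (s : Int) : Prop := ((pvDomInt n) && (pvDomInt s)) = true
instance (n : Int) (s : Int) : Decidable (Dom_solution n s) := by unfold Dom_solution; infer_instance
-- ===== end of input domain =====

-- B replaces A's greedy append/subtract/decrement while-loop by one divmod and the
-- closed-form list [q]*(n-r)+[q+1]*r (objective: simpler).

-- ===== PORT A =====
-- the `while n >= 1` loop: append s//n, s -= s//n, n -= 1
def solutionLoop (n : Int) (s : Int) : List Int :=
  if _h : 1 ≤ n then
    PySem.Int.floordiv s n :: solutionLoop (n - 1) (s - PySem.Int.floordiv s n)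
  else []
termination_by n.toNat
decreasing_by omega

def solution (n : Int) (s : Int) : List Int :=
  if PySem.Int.floordiv s n = 0 then [-1]
  else if PySem.Int.mod s n = 0 then
    -- Python `[s // n] * n` (empty for n ≤ 0)
    List.replicate n.toNat (PySem.Int.floordiv s n)
  else solutionLoop n s

-- ===== PORT B =====
def solution_alt (n : Int) (s : Int) : List Int :=
  let q := PySem.Int.floordiv s n
  let r := PySem.Int.mod s n
  if q = 0 then [-1]
  else List.replicate (n - r).toNat q ++ List.replicate r.toNat (q + 1)

-- ===== PRECONDITION & SPEC =====
-- both programs raise ZeroDivisionError for n = 0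
def Pre_solution (n : Int) (t : Int) : Prop := n ≠ 0
instance (n : Int) (s : Int) : Decidable (Pre_solution n s) := by unfold Pre_solution; infer_instance
def pvWitness_solution : Int × Int := (3, 7)

def Spec_solution (n : Int) (s : Int) (out : List Int) : Prop := out = solution_alt n s
instance (n : Int) (s : Int) (out : List Int) : Decidable (Spec_solution n s out) := by unfold Spec_solution; infer_instance

-- ===== CLAIM (what is proved, stated in full; the proofs are below) =====
def Claim_equal_solution : Prop := ∀ (n : Int) (s : Int), Dom_solution n s → Pre_solution n s → Spec_solution n s (solution n s)

-- ===== LEMMAS AND PROOFS =====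

-- the greedy loop equals the closed form, for every s and n ≥ 1
theorem solutionLoop_nil (n : Int) (t : Int) (hn : ¬ 1 ≤ n) : solutionLoop n t = [] := by
  rw [solutionLoop]; simp [hn]

theorem solutionLoop_closed_aux (k : Nat) : ∀ (s : Int),
    solutionLoop ((k : Int) + 1) s =
      List.replicate (((k : Int) + 1) - PySem.Int.mod s ((k : Int) + 1)).toNat (PySem.Int.floordiv s ((k : Int) + 1)) ++
      List.replicate (PySem.Int.mod s ((k : Int) + 1)).toNat (PySem.Int.floordiv s ((k : Int) + 1) + 1) := by
  induction k with
  | zero =>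
    intro s
    simp only [Nat.cast_zero, zero_add]
    have hd := PySem.Int.floordiv_mul_add_mod s 1
    have h0 := PySem.Int.mod_nonneg s (b := 1) (by omega)
    have h1 := PySem.Int.mod_lt s (b := 1) (by omega)
    have hr : PySem.Int.mod s 1 = 0 := by omega
    have hq : PySem.Int.floordiv s 1 = s := by omega
    rw [solutionLoop, dif_pos (by omega : (1:Int) ≤ 1), solutionLoop_nil _ _ (by omega)]
    simp
  | succ k ih =>
    intro s
    have hcast : ((k + 1 : Nat) : Int) = (k : Int) + 1 := by push_cast; ring
    rw [hcast]
    set n : Int := (k : Int) + 1 + 1 with hn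
    set q : Int := PySem.Int.floordiv s n with hq
    set r : Int := PySem.Int.mod s n with hr
    have hd : q * n + r = s := PySem.Int.floordiv_mul_add_mod s n
    have h0 : 0 ≤ r := PySem.Int.mod_nonneg s (by omega)
    have h1 : r < n := PySem.Int.mod_lt s (by omega)
    have hstep : solutionLoop n s = q :: solutionLoop ((k : Int) + 1) (s - q) := by
      rw [solutionLoop, dif_pos (by omega : (1:Int) ≤ n)]
      have he : n - 1 = (k : Int) + 1 := by omega
      rw [he]
    by_cases hcase : r ≤ (k : Int)
    · -- quotient and remainder survive the step
      have hq' : PySem.Int.floordiv (s - q) ((k : Int) + 1) = q := by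
        rw [PySem.Int.floordiv_eq_iff_of_pos (by omega)]
        constructor <;> nlinarith
      have hr' : PySem.Int.mod (s - q) ((k : Int) + 1) = r := by
        have := PySem.Int.floordiv_mul_add_mod (s - q) ((k : Int) + 1)
        rw [hq'] at this; nlinarith
      have hcnt : (n - r).toNat = (((k : Int) + 1) - r).toNat + 1 := by omega
      rw [hstep, ih, hq', hr', hcnt, List.replicate_succ]
      simp
    · -- r = n - 1: the tail is all (q+1)
      have hrk : r = (k : Int) + 1 := by omega
      have hq' : PySem.Int.floordiv (s - q) ((k : Int) + 1) = q + 1 := by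
        rw [PySem.Int.floordiv_eq_iff_of_pos (by omega)]
        constructor <;> nlinarith
      have hr' : PySem.Int.mod (s - q) ((k : Int) + 1) = 0 := by
        have := PySem.Int.floordiv_mul_add_mod (s - q) ((k : Int) + 1)
        rw [hq'] at this; nlinarith
      have hcnt1 : (n - r).toNat = 1 := by omega
      have hcnt2 : (((k : Int) + 1) - (0:Int)).toNat = r.toNat := by omega
      rw [hstep, ih, hq', hr', hcnt1, hcnt2]
      simp [List.replicate_succ]

theorem solutionLoop_closed (n : Int) (s : Int) (hn : 1 ≤ n) :
    solutionLoop n s =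
      List.replicate (n - PySem.Int.mod s n).toNat (PySem.Int.floordiv s n) ++
      List.replicate (PySem.Int.mod s n).toNat (PySem.Int.floordiv s n + 1) := by
  have hk : n = ((n - 1).toNat : Int) + 1 := by omega
  rw [hk]
  exact solutionLoop_closed_aux (n - 1).toNat s

-- ===== VERDICT (by name: the statement is the Claim_ definition above) =====
theorem solution_spec : Claim_equal_solution := by
  intro n s _ hpre
  unfold Spec_solution solution solution_alt
  by_cases hq0 : PySem.Int.floordiv s n = 0
  · simp [hq0]
  · by_cases hr0 : PySem.Int.mod s n = 0
    · simp [hq0, hr0]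
    · simp only [hq0, hr0, if_false]
      by_cases hneg : n < 0
      · -- n < 0: the loop never runs and both closed-form counts are empty
        have hb := PySem.Int.mod_neg_bounds s (b := n) hneg
        rw [solutionLoop_nil n s (by omega)]
        have e1 : (n - PySem.Int.mod s n).toNat = 0 := by omega
        have e2 : (PySem.Int.mod s n).toNat = 0 := by omega
        simp [e1, e2]
      · unfold Pre_solution at hpre
        have hn1 : 1 ≤ n := by omega
        exact solutionLoop_closed n s hn1
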